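-- pv_equiv track=rewrite | github.com/lhribar/school | faks/Programiranje1 (Python)/AngelcinZapis.py | zapisi
-- ===== SOURCE A (Python) =====
-- def zapisi(ovire):
--     sorted_ovire = sorted(ovire, key = lambda x: (x[2], x[0]))
--     trenutna_vrstica = sorted_ovire[0][2]
--     niz = "(" + str(trenutna_vrstica) + ")"
--
--     for zacetek, konec, vrstica in sorted_ovire:
--         if vrstica == trenutna_vrstica:
--             niz += " " + str(zacetek) + "-" * (konec - zacetek + 1)
--         else:
--             trenutna_vrstica = vrstica
--             niz += "\n"
--             niz += "(" + str(trenutna_vrstica) + ")"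
--             niz += " " + str(zacetek) + "-" * (konec - zacetek + 1)
--
--     return niz
-- ===== SOURCE B (Python) =====
-- def zapisi(ovire):
--     po_vrsticah = {}
--     for o in ovire:
--         po_vrsticah.setdefault(o[2], []).append(o)
--     vrstice = []
--     for v in sorted(po_vrsticah):
--         deli = ["(" + str(v) + ")"]
--         for zacetek, konec, _ in sorted(po_vrsticah[v], key=lambda o: o[0]):
--             deli.append(" " + str(zacetek) + "-" * (konec - zacetek + 1))
--         vrstice.append("".join(deli))
--     return "\n".join(vrstice)
-- ===== Notes on version B (the rewrite author's own statement) =====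
-- stated objective: alternative
-- what changed: B replaces A's global sort by (row,start) followed by a single running-state string pass with an index-then-emit structure: one pass groups the obstacles into a dict keyed by row, then each sorted row key is rendered independently (its obstacles sorted by start) into a line and the lines are joined with newlines.
import Mathlib
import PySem

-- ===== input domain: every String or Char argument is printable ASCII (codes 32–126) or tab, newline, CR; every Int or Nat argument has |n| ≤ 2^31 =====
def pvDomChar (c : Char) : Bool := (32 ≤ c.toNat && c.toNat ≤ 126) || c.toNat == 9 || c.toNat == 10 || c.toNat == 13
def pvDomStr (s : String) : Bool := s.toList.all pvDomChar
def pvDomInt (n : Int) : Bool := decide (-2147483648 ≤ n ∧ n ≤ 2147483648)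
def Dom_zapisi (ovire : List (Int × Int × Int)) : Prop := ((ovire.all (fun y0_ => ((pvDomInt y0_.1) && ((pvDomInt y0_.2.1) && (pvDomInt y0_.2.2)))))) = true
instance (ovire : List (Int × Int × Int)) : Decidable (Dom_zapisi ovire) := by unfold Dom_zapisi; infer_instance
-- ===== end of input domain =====

-- B replaces A's sort-then-running-state pass by a group-by-row dict, rendering each sorted
-- row key independently; equivalence of the RETURN value is proved on nonempty inputs.

-- ===== PORT A =====
-- literal transliteration of A: sort by (row, start), then one fold carrying
-- (trenutna_vrstica, niz); strings are kept as List Char (String.mk at the end).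
def zapisi (ovire : List (Int × Int × Int)) : String :=
  let sorted_ovire := PySem.List.sorted2 ovire (fun x => x.2.2) (fun x => x.1)
  match sorted_ovire with
  | [] => ""   -- Python raises IndexError on sorted_ovire[0]; excluded by Pre_zapisi
  | h :: _ =>
    let st := sorted_ovire.foldl
      (fun (st : Int × List Char) o =>
        if o.2.2 = st.1 then
          (st.1, st.2 ++ ' ' :: PySem.Int.toChars o.1 ++ List.replicate (o.2.1 - o.1 + 1).toNat '-')
        else
          (o.2.2, st.2 ++ '\n' :: ('(' :: PySem.Int.toChars o.2.2 ++ [')'])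
                  ++ ' ' :: PySem.Int.toChars o.1 ++ List.replicate (o.2.1 - o.1 + 1).toNat '-'))
      (h.2.2, '(' :: PySem.Int.toChars h.2.2 ++ [')'])
    String.ofList st.2

-- ===== PORT B =====
-- "(" + str(v) + ")"
def pvGlava (v : Int) : List Char := '(' :: PySem.Int.toChars v ++ [')']
-- " " + str(zacetek) + "-" * (konec - zacetek + 1)
def pvDel (zacetek konec : Int) : List Char :=
  ' ' :: PySem.Int.toChars zacetek ++ List.replicate (konec - zacetek + 1).toNat '-'

-- literal transliteration of B: group the triples into a dict keyed by row, then render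
-- each sorted row key as its own line and join the lines with '\n'.
def zapisi_alt (ovire : List (Int × Int × Int)) : String :=
  let po_vrsticah := ovire.foldl
    (fun d o => PySem.Dict.modify d o.2.2 [] (· ++ [o]))
    (PySem.Dict.empty : PySem.Dict Int (List (Int × Int × Int)))
  let vrstice := (PySem.List.sorted po_vrsticah.keys (fun r => r) false).foldl
    (fun (acc : List (List Char)) v =>
      let deli := (PySem.List.sorted (po_vrsticah.getD v []) (fun o => o.1) false).foldl
        (fun (ds : List (List Char)) o => ds ++ [pvDel o.1 o.2.1]) [pvGlava v]
      acc ++ [PySem.Chars.join [] deli]) []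
  String.ofList (PySem.Chars.join ['\n'] vrstice)

-- ===== PRECONDITION & SPEC =====
-- Pre_ excludes only the empty list, on which Python A raises IndexError (sorted_ovire[0]).
def Pre_zapisi (ovire : List (Int × Int × Int)) : Prop := ovire ≠ []
instance (ovire : List (Int × Int × Int)) : Decidable (Pre_zapisi ovire) := by unfold Pre_zapisi; infer_instance
def pvWitness_zapisi : (List (Int × Int × Int)) := [(1, 3, 0), (5, 5, 2), (0, 1, 0)]

def Spec_zapisi (ovire : List (Int × Int × Int)) (out : String) : Prop := out = zapisi_alt ovire
instance (ovire : List (Int × Int × Int)) (out : String) : Decidable (Spec_zapisi ovire out) := by unfold Spec_zapisi; infer_instance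

-- ===== CLAIM (what is proved, stated in full; the proofs are below) =====
def Claim_equal_zapisi : Prop := ∀ (ovire : List (Int × Int × Int)), Dom_zapisi ovire → Pre_zapisi ovire → Spec_zapisi ovire (zapisi ovire)

-- ===== LEMMAS AND PROOFS =====

def pvRow (o : Int × Int × Int) : Int := o.2.2
def pvChunk (o : Int × Int × Int) : List Char :=
  ' ' :: PySem.Int.toChars o.1 ++ List.replicate (o.2.1 - o.1 + 1).toNat '-'
def pvRows (xs : List (Int × Int × Int)) : List Int :=
  PySem.List.sorted (PySem.Set.ofList (xs.map pvRow)) (fun r => r) false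
def pvGrp (xs : List (Int × Int × Int)) (r : Int) : List (Int × Int × Int) :=
  PySem.List.sorted (xs.filter (fun o => o.2.2 == r)) (fun o => o.1) false
def pvLt (a b : Int × Int × Int) : Bool :=
  decide (a.2.2 < b.2.2) || (!decide (b.2.2 < a.2.2) && decide (a.1 < b.1))

theorem pv_insertBy_append_all_before {α : Type} (before : α → α → Bool) (x : α)
    (l m : List α) (h : ∀ y ∈ m, before x y = true) :
    PySem.List.insertBy before x (l ++ m) = PySem.List.insertBy before x l ++ m := by
  induction l with
  | nil =>
    cases m with
    | nil => simp [PySem.List.insertBy]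
    | cons y ys => simp [PySem.List.insertBy, h y (by simp)]
  | cons a l ih =>
    by_cases hb : before x a = true
    · simp [PySem.List.insertBy, hb]
    · simp only [Bool.not_eq_true] at hb
      simp [PySem.List.insertBy, hb, ih]

theorem pv_insertBy_append_all_not {α : Type} (before : α → α → Bool) (x : α)
    (l m : List α) (h : ∀ y ∈ l, before x y = false) :
    PySem.List.insertBy before x (l ++ m) = l ++ PySem.List.insertBy before x m := by
  induction l with
  | nil => simp
  | cons a l ih =>
    simp [PySem.List.insertBy, h a (by simp)]
    exact ih (fun y hy => h y (by simp [hy]))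

theorem pv_insertBy_congr {α : Type} (before before' : α → α → Bool) (x : α)
    (l : List α) (h : ∀ y ∈ l, before x y = before' x y) :
    PySem.List.insertBy before x l = PySem.List.insertBy before' x l := by
  induction l with
  | nil => rfl
  | cons a l ih =>
    simp only [PySem.List.insertBy, h a (by simp)]
    rw [ih (fun y hy => h y (by simp [hy]))]

theorem pv_ins_mem (o : Int × Int × Int) (g : Int → List (Int × Int × Int)) :
    ∀ (RL : List Int), RL.Pairwise (· < ·) → o.2.2 ∈ RL →
    (∀ r ∈ RL, ∀ y ∈ g r, y.2.2 = r) →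
    PySem.List.insertBy pvLt o (RL.flatMap g)
      = RL.flatMap (fun r => if o.2.2 = r then
          PySem.List.insertBy (fun a b => decide (a.1 < b.1)) o (g r) else g r) := by
  intro RL
  induction RL with
  | nil => intro _ hm; simp at hm
  | cons r' RL' ih =>
    intro hp hm hg
    rcases List.pairwise_cons.mp hp with ⟨hlt, hp'⟩
    by_cases he : o.2.2 = r'
    · -- insert into the head group
      have hall : ∀ y ∈ RL'.flatMap g, pvLt o y = true := by
        intro y hy
        rcases List.mem_flatMap.mp hy with ⟨r'', hr'', hy'⟩
        have hrow : y.2.2 = r'' := hg r'' (by simp [hr'']) y hy'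
        have : r' < r'' := hlt r'' hr''
        simp [pvLt, hrow, he]
        omega
      rw [List.flatMap_cons,
          pv_insertBy_append_all_before _ _ _ _ hall]
      have hcongr : PySem.List.insertBy pvLt o (g r')
          = PySem.List.insertBy (fun a b => decide (a.1 < b.1)) o (g r') := by
        apply pv_insertBy_congr
        intro y hy
        have hrow : y.2.2 = r' := hg r' (by simp) y hy
        simp [pvLt, hrow, he]
      rw [hcongr, List.flatMap_cons]
      simp only [if_pos he]
      congr 1
      refine (List.flatMap_congr ?_).symm
      intro r hr
      have : r' < r := hlt r hr
      simp [if_neg (by omega : ¬ o.2.2 = r)]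
    · -- skip the head group
      have hm' : o.2.2 ∈ RL' := by rcases List.mem_cons.mp hm with h | h; exact absurd h he; exact h
      have hgt : r' < o.2.2 := hlt _ hm'
      have hskip : ∀ y ∈ g r', pvLt o y = false := by
        intro y hy
        have hrow : y.2.2 = r' := hg r' (by simp) y hy
        simp [pvLt, hrow]
        omega
      rw [List.flatMap_cons, pv_insertBy_append_all_not _ _ _ _ hskip,
          ih hp' hm' (fun r hr => hg r (by simp [hr]))]
      simp [if_neg (by omega : ¬ o.2.2 = r')]

theorem pv_ins_new (o : Int × Int × Int) (g : Int → List (Int × Int × Int)) :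
    ∀ (RL : List Int), RL.Pairwise (· < ·) → o.2.2 ∉ RL →
    (∀ r ∈ RL, ∀ y ∈ g r, y.2.2 = r) → g o.2.2 = [] →
    PySem.List.insertBy pvLt o (RL.flatMap g)
      = (PySem.List.insertBy (fun a b => decide (a < b)) o.2.2 RL).flatMap
          (fun r => if o.2.2 = r then
            PySem.List.insertBy (fun a b => decide (a.1 < b.1)) o (g r) else g r) := by
  intro RL
  induction RL with
  | nil =>
    intro _ _ _ hnil
    simp [PySem.List.insertBy, hnil]
  | cons r' RL' ih =>
    intro hp hm hg hnil
    rcases List.pairwise_cons.mp hp with ⟨hlt, hp'⟩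
    have hne : o.2.2 ≠ r' := fun h => hm (by simp [h])
    by_cases hb : o.2.2 < r'
    · -- o's row goes in front of all remaining groups
      have hall : ∀ y ∈ g r' ++ RL'.flatMap g, pvLt o y = true := by
        intro y hy
        rcases List.mem_append.mp hy with hy' | hy'
        · have hrow : y.2.2 = r' := hg r' (by simp) y hy'
          simp [pvLt, hrow]; omega
        · rcases List.mem_flatMap.mp hy' with ⟨r'', hr'', hy''⟩
          have hrow : y.2.2 = r'' := hg r'' (by simp [hr'']) y hy''
          have : r' < r'' := hlt r'' hr''
          simp [pvLt, hrow]; omega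
      rw [List.flatMap_cons]
      rw [show g r' ++ RL'.flatMap g = [] ++ (g r' ++ RL'.flatMap g) from rfl,
          pv_insertBy_append_all_before _ _ _ _ hall]
      have : PySem.List.insertBy (fun a b => decide (a < b)) o.2.2 (r' :: RL') = o.2.2 :: r' :: RL' := by
        simp [PySem.List.insertBy, hb]
      rw [this, List.flatMap_cons]
      simp only [hnil, List.flatMap_cons, PySem.List.insertBy]
      congr 1
      · simp [if_neg hne]
        refine (List.flatMap_congr ?_).symm
        intro r hr
        have h1 : r' < r := hlt r hr
        have h2 : o.2.2 ∉ RL' := fun h => hm (by simp [h])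
        have : o.2.2 ≠ r := fun h => h2 (h ▸ hr)
        simp [if_neg this]
    · have hgt : r' < o.2.2 := by omega
      have hskip : ∀ y ∈ g r', pvLt o y = false := by
        intro y hy
        have hrow : y.2.2 = r' := hg r' (by simp) y hy
        simp [pvLt, hrow]; omega
      rw [List.flatMap_cons, pv_insertBy_append_all_not _ _ _ _ hskip,
          ih hp' (fun h => hm (by simp [h])) (fun r hr => hg r (by simp [hr])) hnil]
      have : PySem.List.insertBy (fun a b => decide (a < b)) o.2.2 (r' :: RL')
           = r' :: PySem.List.insertBy (fun a b => decide (a < b)) o.2.2 RL' := by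
        simp [PySem.List.insertBy]; omega
      rw [this, List.flatMap_cons]
      simp [if_neg hne]

theorem pv_grp_row (xs : List (Int × Int × Int)) (r : Int) :
    ∀ y ∈ pvGrp xs r, y.2.2 = r := by
  intro y hy
  have h2 := (PySem.List.mem_sorted _ _ _ _).mp hy
  have h3 := List.mem_filter.mp h2
  simpa using h3.2

theorem pv_sorted_append_singleton {α κ : Type} [LinearOrder κ] (xs : List α) (x : α) (key : α → κ) :
    PySem.List.sorted (xs ++ [x]) key false
      = PySem.List.insertBy (fun a b => decide (key a < key b)) x (PySem.List.sorted xs key false) := by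
  rw [PySem.List.sorted_eq_foldl_insertBy, PySem.List.sorted_eq_foldl_insertBy, List.foldl_append]
  rfl

theorem pv_grp_append (xs : List (Int × Int × Int)) (o : Int × Int × Int) (r : Int) :
    pvGrp (xs ++ [o]) r = if o.2.2 = r then
        PySem.List.insertBy (fun a b => decide (a.1 < b.1)) o (pvGrp xs r) else pvGrp xs r := by
  unfold pvGrp
  rw [List.filter_append]
  by_cases h : o.2.2 = r
  · simp only [List.filter_cons, List.filter_nil, if_pos h]
    simp [h, pv_sorted_append_singleton]
  · simp [h]

theorem pv_ofList_append (l : List Int) (x : Int) :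
    PySem.Set.ofList (l ++ [x]) = if x ∈ l then PySem.Set.ofList l else PySem.Set.ofList l ++ [x] := by
  rw [PySem.Set.ofList_eq_foldl, List.foldl_append]
  simp only [List.foldl_cons, List.foldl_nil]
  rw [← PySem.Set.ofList_eq_foldl]
  unfold PySem.Set.add
  by_cases h : x ∈ l
  · rw [if_pos ((PySem.Set.contains_iff _ _).mpr ((PySem.Set.mem_ofList _ _).mpr h)), if_pos h]
  · rw [if_neg h, if_neg]
    rw [Bool.not_eq_true]
    rw [Bool.eq_false_iff]
    intro hc
    exact h ((PySem.Set.mem_ofList _ _).mp ((PySem.Set.contains_iff _ _).mp hc))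

theorem pv_rows_append_mem (xs : List (Int × Int × Int)) (o : Int × Int × Int)
    (h : o.2.2 ∈ xs.map pvRow) : pvRows (xs ++ [o]) = pvRows xs := by
  unfold pvRows
  rw [List.map_append, List.map_cons, List.map_nil, show pvRow o = o.2.2 from rfl,
      pv_ofList_append, if_pos h]

theorem pv_rows_append_new (xs : List (Int × Int × Int)) (o : Int × Int × Int)
    (h : o.2.2 ∉ xs.map pvRow) :
    pvRows (xs ++ [o]) = PySem.List.insertBy (fun a b => decide (a < b)) o.2.2 (pvRows xs) := by
  unfold pvRows
  rw [List.map_append, List.map_cons, List.map_nil, show pvRow o = o.2.2 from rfl,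
      pv_ofList_append, if_neg h]
  exact pv_sorted_append_singleton _ _ _

theorem pv_decomp (xs : List (Int × Int × Int)) :
    PySem.List.sorted2 xs (fun x => x.2.2) (fun x => x.1) = (pvRows xs).flatMap (pvGrp xs) := by
  induction xs using List.reverseRecOn with
  | nil => rfl
  | append_singleton xs o ih =>
    have hstep : PySem.List.sorted2 (xs ++ [o]) (fun x => x.2.2) (fun x => x.1)
        = PySem.List.insertBy pvLt o (PySem.List.sorted2 xs (fun x => x.2.2) (fun x => x.1)) := by
      unfold PySem.List.sorted2
      rw [List.foldl_append]
      rfl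
    rw [hstep, ih]
    have hpw : (pvRows xs).Pairwise (· < ·) := by
      unfold pvRows
      exact PySem.List.sorted_ofList_pairwise_lt _
    have hgr : ∀ r ∈ pvRows xs, ∀ y ∈ pvGrp xs r, y.2.2 = r := fun r _ => pv_grp_row xs r
    by_cases hm : o.2.2 ∈ xs.map pvRow
    · have hm' : o.2.2 ∈ pvRows xs := by
        unfold pvRows; rw [PySem.List.mem_sorted, PySem.Set.mem_ofList]; exact hm
      rw [pv_ins_mem o (pvGrp xs) (pvRows xs) hpw hm' hgr, pv_rows_append_mem xs o hm]
      exact List.flatMap_congr (fun r _ => (pv_grp_append xs o r).symm)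
    · have hm' : o.2.2 ∉ pvRows xs := by
        unfold pvRows; rw [PySem.List.mem_sorted, PySem.Set.mem_ofList]; exact hm
      have hnil : pvGrp xs o.2.2 = [] := by
        unfold pvGrp
        rw [PySem.List.sorted_eq_nil_iff]
        rw [List.filter_eq_nil_iff]
        intro y hy hbeq
        apply hm
        rw [List.mem_map]
        exact ⟨y, hy, by simpa using hbeq⟩
      rw [pv_ins_new o (pvGrp xs) (pvRows xs) hpw hm' hgr hnil, pv_rows_append_new xs o hm]
      exact List.flatMap_congr (fun r _ => (pv_grp_append xs o r).symm)

def pvStep (st : Int × List Char) (o : Int × Int × Int) : Int × List Char :=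
  if o.2.2 = st.1 then (st.1, st.2 ++ pvChunk o)
  else (o.2.2, st.2 ++ '\n' :: pvGlava o.2.2 ++ pvChunk o)
def pvLine (xs : List (Int × Int × Int)) (r : Int) : List Char :=
  pvGlava r ++ (pvGrp xs r).flatMap pvChunk

theorem pv_joinNL (a : List Char) (L : List (List Char)) :
    PySem.Chars.join ['\n'] (a :: L) = a ++ L.flatMap (fun b => '\n' :: b) := by
  induction L generalizing a with
  | nil => simp [PySem.Chars.join_singleton]
  | cons b L ih => rw [PySem.Chars.join_cons_cons, ih b]; simp

theorem pv_join_empty (L : List (List Char)) : PySem.Chars.join [] L = L.flatten := by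
  cases L with
  | nil => simp [PySem.Chars.join_nil]
  | cons a L =>
    induction L generalizing a with
    | nil => simp [PySem.Chars.join_singleton]
    | cons b L ih => rw [PySem.Chars.join_cons_cons, ih b]; simp

theorem pv_foldGroup (l : List (Int × Int × Int)) (cur : Int) (acc : List Char)
    (h : ∀ y ∈ l, y.2.2 = cur) :
    l.foldl pvStep (cur, acc) = (cur, acc ++ l.flatMap pvChunk) := by
  induction l generalizing acc with
  | nil => simp
  | cons y l ih =>
    rw [List.foldl_cons, show pvStep (cur, acc) y = (cur, acc ++ pvChunk y) from by
      simp [pvStep, h y (by simp)], ih _ (fun z hz => h z (by simp [hz]))]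
    simp

theorem pv_foldRest (g : Int → List (Int × Int × Int)) :
    ∀ (RL : List Int) (cur : Int) (acc : List Char), (cur :: RL).Pairwise (· < ·) →
    (∀ r ∈ RL, ∀ y ∈ g r, y.2.2 = r) → (∀ r ∈ RL, g r ≠ []) →
    ∃ c, (RL.flatMap g).foldl pvStep (cur, acc)
      = (c, acc ++ RL.flatMap (fun r => '\n' :: pvGlava r ++ (g r).flatMap pvChunk)) := by
  intro RL
  induction RL with
  | nil => intro cur acc _ _ _; exact ⟨cur, by simp⟩
  | cons r' RL' ih =>
    intro cur acc hp hg hne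
    rcases List.pairwise_cons.mp hp with ⟨hlt, hp'⟩
    obtain ⟨y0, tl, hgr⟩ : ∃ y0 tl, g r' = y0 :: tl := by
      cases hgr : g r' with
      | nil => exact absurd hgr (hne r' (by simp))
      | cons a b => exact ⟨a, b, rfl⟩
    have hy0 : y0.2.2 = r' := hg r' (by simp) y0 (by simp [hgr])
    have hne0 : y0.2.2 ≠ cur := by have := hlt r' (by simp); omega
    rw [List.flatMap_cons, List.foldl_append, hgr, List.foldl_cons]
    rw [show pvStep (cur, acc) y0 = (r', acc ++ '\n' :: pvGlava r' ++ pvChunk y0) from by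
      simp [pvStep, hy0, (show ¬ (r' = cur) from by have := hlt r' (by simp); omega)]]
    rw [pv_foldGroup tl r' _ (fun z hz => hg r' (by simp) z (by simp [hgr, hz]))]
    obtain ⟨c, hc⟩ := ih r' (acc ++ '\n' :: pvGlava r' ++ pvChunk y0 ++ tl.flatMap pvChunk)
      hp' (fun r hr => hg r (by simp [hr])) (fun r hr => hne r (by simp [hr]))
    refine ⟨c, ?_⟩
    rw [hc]
    simp [hgr]

theorem pv_rows_ne_nil (xs : List (Int × Int × Int)) (h : xs ≠ []) : pvRows xs ≠ [] := by
  intro hr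
  unfold pvRows at hr
  rw [PySem.List.sorted_eq_nil_iff] at hr
  cases xs with
  | nil => exact h rfl
  | cons a t =>
    have : pvRow a ∈ PySem.Set.ofList ((a :: t).map pvRow) :=
      (PySem.Set.mem_ofList _ _).mpr (by simp)
    rw [hr] at this
    simp at this

theorem pv_grp_ne_nil (xs : List (Int × Int × Int)) (r : Int) (h : r ∈ pvRows xs) :
    pvGrp xs r ≠ [] := by
  intro hg
  unfold pvGrp at hg
  rw [PySem.List.sorted_eq_nil_iff, List.filter_eq_nil_iff] at hg
  unfold pvRows at h
  rw [PySem.List.mem_sorted, PySem.Set.mem_ofList, List.mem_map] at h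
  obtain ⟨o, ho, hor⟩ := h
  exact hg o ho (by simp [pvRow] at hor; simp [hor])

theorem pv_A (xs : List (Int × Int × Int)) (h : xs ≠ []) :
    zapisi xs = String.ofList (PySem.Chars.join ['\n'] ((pvRows xs).map (pvLine xs))) := by
  obtain ⟨r0, RL, hR⟩ : ∃ r0 RL, pvRows xs = r0 :: RL := by
    cases hR : pvRows xs with
    | nil => exact absurd hR (pv_rows_ne_nil xs h)
    | cons a b => exact ⟨a, b, rfl⟩
  obtain ⟨y0, tl, hG⟩ : ∃ y0 tl, pvGrp xs r0 = y0 :: tl := by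
    cases hG : pvGrp xs r0 with
    | nil => exact absurd hG (pv_grp_ne_nil xs r0 (by simp [hR]))
    | cons a b => exact ⟨a, b, rfl⟩
  have hy0 : y0.2.2 = r0 := pv_grp_row xs r0 y0 (by simp [hG])
  have hpw : (pvRows xs).Pairwise (· < ·) := by
    unfold pvRows; exact PySem.List.sorted_ofList_pairwise_lt _
  rw [hR] at hpw
  have hflat : PySem.List.sorted2 xs (fun x => x.2.2) (fun x => x.1)
      = y0 :: (tl ++ RL.flatMap (pvGrp xs)) := by
    rw [pv_decomp, hR, List.flatMap_cons, hG]; rfl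
  unfold zapisi
  rw [hflat]
  have hstep : (fun (st : Int × List Char) (o : Int × Int × Int) =>
      if o.2.2 = st.1 then
        (st.1, st.2 ++ ' ' :: PySem.Int.toChars o.1 ++ List.replicate (o.2.1 - o.1 + 1).toNat '-')
      else
        (o.2.2, st.2 ++ '\n' :: ('(' :: PySem.Int.toChars o.2.2 ++ [')'])
                ++ ' ' :: PySem.Int.toChars o.1 ++ List.replicate (o.2.1 - o.1 + 1).toNat '-')) = pvStep := by
    funext st o
    simp only [pvStep, pvChunk, pvGlava]
    split_ifs <;> simp
  simp only [List.foldl_cons, hstep]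
  rw [show pvStep (y0.2.2, '(' :: PySem.Int.toChars y0.2.2 ++ [')']) y0
        = (r0, pvGlava r0 ++ pvChunk y0) from by
    simp [pvStep, pvChunk, pvGlava, hy0]]
  rw [List.foldl_append, pv_foldGroup tl r0 _ (fun z hz => pv_grp_row xs r0 z (by simp [hG, hz]))]
  obtain ⟨c, hc⟩ := pv_foldRest (pvGrp xs) RL r0 (pvGlava r0 ++ pvChunk y0 ++ tl.flatMap pvChunk)
    hpw (fun r hr => pv_grp_row xs r) (fun r hr => pv_grp_ne_nil xs r (by simp [hR, hr]))
  rw [hc]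
  rw [hR, List.map_cons, pv_joinNL]
  simp [hG, List.flatMap_map, pvLine]

theorem pv_dict_keys (xs : List (Int × Int × Int)) :
    (xs.foldl (fun d o => PySem.Dict.modify d o.2.2 [] (· ++ [o]))
      (PySem.Dict.empty : PySem.Dict Int (List (Int × Int × Int)))).keys
      = PySem.Set.ofList (xs.map pvRow) := by
  rw [PySem.Dict.keys_foldl_modify_key xs (fun o => o.2.2) [] (fun _ o => (· ++ [o])) _]
  rw [PySem.Dict.keys_empty, PySem.Set.ofList_eq_foldl]
  rfl

theorem pv_dict_getD (xs : List (Int × Int × Int)) (v : Int) :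
    (xs.foldl (fun d o => PySem.Dict.modify d o.2.2 [] (· ++ [o]))
      (PySem.Dict.empty : PySem.Dict Int (List (Int × Int × Int)))).getD v []
      = xs.filter (fun o => o.2.2 == v) := by
  have h := PySem.Dict.getD_foldl_modify_append (xs.map (fun o => (o.2.2, o)))
    (PySem.Dict.empty : PySem.Dict Int (List (Int × Int × Int))) v
  rw [List.foldl_map] at h
  rw [show (fun (d : PySem.Dict Int (List (Int × Int × Int))) o =>
        PySem.Dict.modify d o.2.2 [] (· ++ [o]))
      = (fun d (o : Int × Int × Int) => PySem.Dict.modify d ((o.2.2, o)).1 [] (fun x => x ++ [((o.2.2, o)).2])) from rfl]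
  rw [h, PySem.Dict.getD_empty, List.filter_map, List.map_map]
  simp [Function.comp_def]

theorem pv_B (xs : List (Int × Int × Int)) :
    zapisi_alt xs = String.ofList (PySem.Chars.join ['\n'] ((pvRows xs).map (pvLine xs))) := by
  unfold zapisi_alt
  simp only [pv_dict_keys, pv_dict_getD]
  rw [PySem.List.foldl_append_singleton_eq_map (fun v => PySem.Chars.join []
      ((PySem.List.sorted ((xs.filter (fun o => o.2.2 == v))) (fun o => o.1) false).foldl
        (fun ds o => ds ++ [pvDel o.1 o.2.1]) [pvGlava v]))]
  rw [List.nil_append]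
  rw [show PySem.List.sorted (PySem.Set.ofList (xs.map pvRow)) (fun r => r) false = pvRows xs from rfl]
  congr 2
  apply List.map_congr_left
  intro v hv
  rw [PySem.List.foldl_append_singleton_eq_map (fun o : Int × Int × Int => pvDel o.1 o.2.1)]
  rw [pv_join_empty]
  simp [pvLine, pvGrp, pvDel, pvGlava, List.flatMap]
  congr 1


-- ===== VERDICT (by name: the statement is the Claim_ definition above) =====
theorem zapisi_spec : Claim_equal_zapisi := by
  intro ov _ hpre
  unfold Spec_zapisi
  rw [pv_A ov hpre, pv_B ov]
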